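-- pv_equiv track=rewrite | github.com/grgalex/pyxray | scripts/analyze_candidates.py | get_import_name_pairs
-- ===== SOURCE A (Python) =====
-- def get_import_name_pairs(import_name):
--     parts = import_name.split(".")
--     pairs = []
--
--     for i in range(1, len(parts)):
--         prefix = ".".join(parts[:i])
--         suffix = ".".join(parts[i:])
--         pairs.append((prefix, suffix))
--     return pairs
-- ===== SOURCE B (Python) =====
-- def get_import_name_pairs(import_name):
--     return [(import_name[:i], import_name[i + 1:])
--             for i, c in enumerate(import_name) if c == "."]
-- ===== Notes on version B (the rewrite author's own statement) =====
-- stated objective: simpler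
-- what changed: B never builds a token list: instead of splitting into parts and re-joining prefix/suffix with the separator, it scans the string once for dot positions and slices the raw string at each dot position.
import Mathlib
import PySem

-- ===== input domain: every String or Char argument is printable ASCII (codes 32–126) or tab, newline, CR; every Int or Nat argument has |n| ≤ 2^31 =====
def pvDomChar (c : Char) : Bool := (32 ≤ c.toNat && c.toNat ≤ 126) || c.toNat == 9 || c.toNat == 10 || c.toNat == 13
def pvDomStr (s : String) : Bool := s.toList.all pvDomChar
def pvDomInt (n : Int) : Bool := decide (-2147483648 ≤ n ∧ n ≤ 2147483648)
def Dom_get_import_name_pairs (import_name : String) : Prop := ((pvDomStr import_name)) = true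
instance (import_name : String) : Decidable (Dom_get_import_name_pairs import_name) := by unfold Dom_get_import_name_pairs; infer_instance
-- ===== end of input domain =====

-- B replaces A's split-into-parts-and-rejoin by a single scan for dot positions with raw-string slices (objective: simpler).

-- ===== PORT A =====
def get_import_name_pairs (import_name : String) : List (String × String) :=
  match PySem.Str.split? import_name "." with
  | none => []   -- unreachable: the split separator is non-empty
  | some parts =>
    (PySem.List.pyRange 1 (parts.length : Int)).foldl
      (fun pairs i =>
        pairs ++ [(PySem.Str.join "." (PySem.List.slice parts none (some i)),
                   PySem.Str.join "." (PySem.List.slice parts (some i) none))]) []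

-- ===== PORT B =====
-- comprehension over enumerate(import_name); s[:i] and s[i+1:] are PySem.List.slice on the char list (exact for these slice forms)
def get_import_name_pairs_alt (import_name : String) : List (String × String) :=
  (PySem.List.enumerate import_name.toList).filterMap (fun ic =>
    if ic.2 = '.' then
      some (String.ofList (PySem.List.slice import_name.toList none (some ic.1)),
            String.ofList (PySem.List.slice import_name.toList (some (ic.1 + 1)) none))
    else none)

-- ===== PRECONDITION & SPEC =====
def Spec_get_import_name_pairs (import_name : String) (out : List (String × String)) : Prop := out = get_import_name_pairs_alt import_name
instance (import_name : String) (out : List (String × String)) : Decidable (Spec_get_import_name_pairs import_name out) := by unfold Spec_get_import_name_pairs; infer_instance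

-- ===== CLAIM (what is proved, stated in full; the proofs are below) =====
def Claim_equal_get_import_name_pairs : Prop := ∀ (import_name : String), Dom_get_import_name_pairs import_name → Spec_get_import_name_pairs import_name (get_import_name_pairs import_name)

-- ===== LEMMAS AND PROOFS =====

theorem splitOn_go_spec (d : Char) (fuel : Nat) :
    ∀ (l cur : List Char) (accs : List (List Char)), l.length ≤ fuel →
      PySem.Chars.splitOn.go [d] fuel l cur accs =
        accs.reverse ++ (List.splitOn d l).modifyHead (cur.reverse ++ ·) := by
  induction fuel with
  | zero =>
    intro l cur accs h
    have hl : l = [] := List.eq_nil_of_length_eq_zero (Nat.le_zero.mp h)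
    subst hl
    simp [PySem.Chars.splitOn.go, List.splitOn]
  | succ n ih =>
    intro l cur accs h
    cases l with
    | nil => simp [PySem.Chars.splitOn.go, List.splitOn]
    | cons c rest =>
      have hrest : rest.length ≤ n := by simpa using h
      by_cases hdc : d = c
      · subst hdc
        have : PySem.Chars.splitOn.go [d] (n+1) (d :: rest) cur accs
            = PySem.Chars.splitOn.go [d] n rest [] (cur.reverse :: accs) := by
          simp [PySem.Chars.splitOn.go, List.isPrefixOf]
        rw [this, ih rest [] _ hrest]
        obtain ⟨hp, tp, hE⟩ := List.exists_cons_of_ne_nil (List.splitOnP_ne_nil (· == d) rest)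
        simp [List.splitOn, List.splitOnP_cons, hE]
      · have : PySem.Chars.splitOn.go [d] (n+1) (c :: rest) cur accs
            = PySem.Chars.splitOn.go [d] n rest (c :: cur) accs := by
          simp [PySem.Chars.splitOn.go, List.isPrefixOf, hdc]
        rw [this, ih rest (c :: cur) _ hrest]
        obtain ⟨hp, tp, hE⟩ := List.exists_cons_of_ne_nil (List.splitOnP_ne_nil (· == d) rest)
        have hcd : (c == d) = false := by simp [Ne.symm hdc]
        simp [List.splitOn, List.splitOnP_cons, hE, hcd]

theorem chars_splitOn_eq (cs : List Char) (d : Char) :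
    PySem.Chars.splitOn cs [d] = List.splitOn d cs := by
  have := splitOn_go_spec d (cs.length + 1) cs [] [] (by omega)
  rw [PySem.Chars.splitOn, this]
  obtain ⟨hp, tp, hE⟩ := List.exists_cons_of_ne_nil (List.splitOnP_ne_nil (· == d) cs)
  simp [List.splitOn, hE]

theorem splitOn_pieces (d : Char) (cs : List Char) : ∀ l ∈ List.splitOn d cs, d ∉ l := by
  induction cs with
  | nil => simp [List.splitOn]
  | cons c rest ih =>
    intro l hl
    rw [List.splitOn, List.splitOnP_cons] at hl
    by_cases hcd : c = d
    · simp [hcd] at hl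
      rcases hl with rfl | hl
      · simp
      · exact ih l (by simpa [List.splitOn] using hl)
    · obtain ⟨hp, tp, hE⟩ := List.exists_cons_of_ne_nil (List.splitOnP_ne_nil (· == d) rest)
      rw [if_neg (by simp [hcd]), hE] at hl
      simp at hl
      rcases hl with rfl | hl
      · have hdp : d ∉ hp := ih hp (by simp [List.splitOn, hE])
        simp [Ne.symm hcd, hdp]
      · exact ih l (by simp [List.splitOn, hE, hl])

def dpairs : List Char → List (List Char × List Char)
  | [] => []
  | c :: cs => (if c = '.' then [(([] : List Char), cs)] else []) ++ (dpairs cs).map (fun ab => (c :: ab.1, ab.2))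

theorem zip_spec (cs : List Char) : ∀ (p : List Char),
    (cs.zipIdx p.length).filterMap
        (fun ci => if ci.1 = '.' then some ((p ++ cs).take ci.2, (p ++ cs).drop (ci.2 + 1)) else none)
      = (dpairs cs).map (fun ab => (p ++ ab.1, ab.2)) := by
  induction cs with
  | nil => intro p; simp [dpairs]
  | cons c cs ih =>
    intro p
    have hsplit : p ++ c :: cs = (p ++ [c]) ++ cs := by simp
    have hlen : p.length + 1 = (p ++ [c]).length := by simp
    rw [List.zipIdx_cons, List.filterMap_cons]
    have htail :
        (cs.zipIdx (p.length + 1)).filterMap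
          (fun ci => if ci.1 = '.' then some ((p ++ c :: cs).take ci.2, (p ++ c :: cs).drop (ci.2 + 1)) else none)
        = (dpairs cs).map (fun ab => ((p ++ [c]) ++ ab.1, ab.2)) := by
      rw [hsplit, hlen, ih (p ++ [c])]
    by_cases hc : c = '.'
    · subst hc
      simp only [if_pos rfl]
      rw [htail]
      have h1 : (p ++ '.' :: cs).take p.length = p := by
        rw [hsplit]; rw [List.take_append_of_le_length (by simp)]; simp [List.take_left]
      have h2 : (p ++ '.' :: cs).drop (p.length + 1) = cs := by
        rw [hsplit, hlen, List.drop_left]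
      rw [h1, h2]
      simp [dpairs, List.map_map, Function.comp_def]
    · rw [if_neg (by simpa using hc)]
      rw [htail]
      simp [dpairs, hc, List.map_map, Function.comp_def]

theorem alt_eq (s : String) :
    get_import_name_pairs_alt s
      = (dpairs s.toList).map (fun ab => (String.ofList ab.1, String.ofList ab.2)) := by
  have h0 := zip_spec s.toList []
  simp only [List.nil_append, List.length_nil, Prod.mk.eta, List.map_id_fun', id_eq] at h0
  unfold get_import_name_pairs_alt
  rw [PySem.List.enumerate_eq_zipIdx_map s.toList 0, List.filterMap_map, ← h0, List.map_filterMap]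
  apply List.filterMap_congr
  intro ci _
  simp only [Function.comp_def]
  by_cases hc : ci.1 = '.'
  · rw [if_pos hc, if_pos hc]
    have e1 : PySem.List.slice s.toList none (some (0 + (ci.2 : Int))) = s.toList.take ci.2 := by
      rw [PySem.List.slice_to _ (by omega)]; norm_num
    have e2 : PySem.List.slice s.toList (some (0 + (ci.2 : Int) + 1)) none = s.toList.drop (ci.2 + 1) := by
      rw [PySem.List.slice_from _ (by omega)]
      congr 1
      omega
    rw [e1, e2]
    simp
  · rw [if_neg hc, if_neg hc]
    simp

theorem dpairs_nodot (p : List Char) (h : '.' ∉ p) : dpairs p = [] := by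
  induction p with
  | nil => rfl
  | cons c cs ih =>
    simp only [List.mem_cons, not_or] at h
    simp [dpairs, Ne.symm h.1, ih h.2]

theorem dpairs_append_nodot (p q : List Char) (h : '.' ∉ p) :
    dpairs (p ++ q) = (dpairs q).map (fun ab => (p ++ ab.1, ab.2)) := by
  induction p with
  | nil => simp
  | cons c cs ih =>
    simp only [List.mem_cons, not_or] at h
    simp [dpairs, Ne.symm h.1, ih h.2, List.map_map, Function.comp_def]

theorem intercalate_cons (x : Char) (a : List Char) (l : List (List Char)) (h : l ≠ []) :
    [x].intercalate (a :: l) = a ++ x :: [x].intercalate l := by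
  obtain ⟨b, t, rfl⟩ := List.exists_cons_of_ne_nil h
  simp [List.intercalate, List.intersperse]

theorem dpairs_intercalate (ps : List (List Char)) (hne : ps ≠ []) (hd : ∀ p ∈ ps, '.' ∉ p) :
    dpairs (['.'].intercalate ps)
      = (List.range (ps.length - 1)).map
          (fun k => (['.'].intercalate (ps.take (k + 1)), ['.'].intercalate (ps.drop (k + 1)))) := by
  induction ps with
  | nil => exact absurd rfl hne
  | cons p ps ih =>
    by_cases hps : ps = []
    · subst hps
      simp [List.intercalate, dpairs_nodot p (hd p (by simp))]
    · rw [intercalate_cons '.' p ps hps]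
      rw [dpairs_append_nodot p _ (hd p (by simp))]
      have hstep : dpairs ('.' :: ['.'].intercalate ps)
          = ([], ['.'].intercalate ps) :: (dpairs (['.'].intercalate ps)).map (fun ab => ('.' :: ab.1, ab.2)) := by
        simp [dpairs]
      rw [hstep, ih hps (fun q hq => hd q (by simp [hq]))]
      have hlen : (p :: ps).length - 1 = (ps.length - 1) + 1 := by
        cases ps with
        | nil => exact absurd rfl hps
        | cons a l => simp
      rw [hlen, List.range_succ_eq_map]
      rw [List.map_cons]
      congr 1
      · simp only [List.map_map, Function.comp_def]
        refine List.map_congr_left ?_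
        intro k _
        have htk : ps.take (k + 1) ≠ [] := by
          simp [List.take_eq_nil_iff, hps]
        simp [List.take_succ_cons, List.drop_succ_cons, intercalate_cons '.' _ _ htk]

theorem join_ofList (l : List (List Char)) :
    PySem.Str.join "." (List.map String.ofList l) = String.ofList (['.'].intercalate l) := by
  simp [PySem.Str.join, PySem.Chars.join, List.map_map, Function.comp_def, String.toList_ofList]

theorem flatMap_single {α β : Type} (f : α → List β) (g : α → β) (h : ∀ x, f x = [g x]) (l : List α) :
    l.flatMap f = l.map g := by
  induction l with
  | nil => rfl
  | cons a l ih => simp [List.flatMap_cons, h, ih]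

theorem a_eq (s : String) :
    get_import_name_pairs s
      = (List.range ((List.splitOn '.' s.toList).length - 1)).map
          (fun k => (String.ofList (['.'].intercalate ((List.splitOn '.' s.toList).take (k + 1))),
                     String.ofList (['.'].intercalate ((List.splitOn '.' s.toList).drop (k + 1))))) := by
  unfold get_import_name_pairs
  have hsplit : PySem.Str.split? s "." = some (List.map String.ofList (List.splitOn '.' s.toList)) := by
    simp [PySem.Str.split?, PySem.Chars.split?, chars_splitOn_eq]
  rw [hsplit]
  dsimp only
  rw [PySem.List.foldl_append_eq_flatMap]
  rw [PySem.List.pyRange_one]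
  rw [flatMap_single _ _ (fun i => rfl)]
  rw [List.map_map]
  have hN : ((List.map String.ofList (List.splitOn '.' s.toList)).length - 1 : Int).toNat
      = (List.splitOn '.' s.toList).length - 1 := by
    simp only [List.length_map]; omega
  rw [hN]
  simp only [List.nil_append]
  refine List.map_congr_left ?_
  intro k _
  have e1 : PySem.List.slice (List.map String.ofList (List.splitOn '.' s.toList)) none (some (1 + (k : Int)))
      = List.map String.ofList ((List.splitOn '.' s.toList).take (k + 1)) := by
    rw [PySem.List.slice_to _ (by omega)]
    rw [show ((1 : Int) + (k : Int)).toNat = k + 1 by omega]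
    rw [List.map_take]
  have e2 : PySem.List.slice (List.map String.ofList (List.splitOn '.' s.toList)) (some (1 + (k : Int))) none
      = List.map String.ofList ((List.splitOn '.' s.toList).drop (k + 1)) := by
    rw [PySem.List.slice_from _ (by omega)]
    rw [show ((1 : Int) + (k : Int)).toNat = k + 1 by omega]
    rw [List.map_drop]
  simp only [Function.comp_def, e1, e2, join_ofList]

-- ===== VERDICT (by name: the statement is the Claim_ definition above) =====
theorem get_import_name_pairs_spec : Claim_equal_get_import_name_pairs := by
  intro s _
  unfold Spec_get_import_name_pairs
  rw [alt_eq, a_eq]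
  conv_rhs => rw [show s.toList = ['.'].intercalate (List.splitOn '.' s.toList) from
    (List.intercalate_splitOn _ _).symm]
  rw [dpairs_intercalate _ (by exact List.splitOnP_ne_nil _ _) (splitOn_pieces _ _)]
  simp [List.map_map, Function.comp_def]
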